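-- pv_equiv track=rewrite | github.com/Davidcortes0/M2022 | Ej4.py | stack_sep
-- ===== SOURCE A (Python) =====
-- def stack_sep(lista):
-- 	bloques = []
-- 	subbloque = []
-- 	for i in lista:
-- 		if str(1) in str(i):
-- 			subbloque.append(i)
-- 		else:
-- 			if subbloque != []:
-- 				bloques.append(subbloque)
-- 			bloques.append([i])
-- 			subbloque = []
-- 	return bloques
-- ===== SOURCE B (Python) =====
-- def stack_sep(lista):
--     # Run-scanning re-implementation: find each maximal run of '1'-containing
--     # elements with an index scan and emit it as one slice; other elements are
--     # emitted as singletons.  Like the original, a trailing '1'-run (one not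
--     # followed by any further element) is never emitted.
--     out = []
--     i = 0
--     n = len(lista)
--     while i < n:
--         if '1' in str(lista[i]):
--             j = i + 1
--             while j < n and '1' in str(lista[j]):
--                 j += 1
--             if j < n:
--                 out.append(lista[i:j])
--             i = j
--         else:
--             out.append([lista[i]])
--             i += 1
--     return out
-- ===== Notes on version B (the rewrite author's own statement) =====
-- stated objective: alternative
-- what changed: Replaces A's accumulator-and-flush fold (growing a pending subbloque element by element and flushing it on each non-'1' element) with an index scan that locates each maximal run of '1'-containing elements and emits it as a single slice, singletons otherwise.
import Mathlib
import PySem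

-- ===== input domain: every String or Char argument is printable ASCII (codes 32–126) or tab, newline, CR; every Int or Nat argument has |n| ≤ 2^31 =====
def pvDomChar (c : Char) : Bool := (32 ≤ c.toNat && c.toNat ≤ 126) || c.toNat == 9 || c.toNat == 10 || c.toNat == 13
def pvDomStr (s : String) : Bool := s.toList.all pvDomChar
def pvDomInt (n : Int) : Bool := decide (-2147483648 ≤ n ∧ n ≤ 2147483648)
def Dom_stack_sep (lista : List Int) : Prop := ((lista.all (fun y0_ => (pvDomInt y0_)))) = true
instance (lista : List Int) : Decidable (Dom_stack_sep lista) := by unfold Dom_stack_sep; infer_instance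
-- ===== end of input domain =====

-- B re-implements A's accumulator-and-flush pass as a run-scan emitting each maximal
-- '1'-run as one block (the trailing '1'-run, never flushed by A, is likewise not emitted).

-- '1' in str(i)
def has1 (i : Int) : Bool := PySem.Str.isIn "1" (PySem.Int.toStr i)

-- ===== PORT A =====
def stack_sep (lista : List Int) : List (List Int) :=
  (lista.foldl
    (fun (st : List (List Int) × List Int) i =>
      if has1 i then (st.1, st.2 ++ [i])
      else ((if st.2 ≠ [] then st.1 ++ [st.2] else st.1) ++ [[i]], []))
    ([], [])).1

-- ===== PORT B =====
-- inner while loop of Source B: collect the maximal leading run of '1'-elements, return (run, rest)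
def runScan : List Int → List Int × List Int
  | [] => ([], [])
  | x :: xs => if has1 x then let p := runScan xs; (x :: p.1, p.2) else ([], x :: xs)

theorem runScan_length : ∀ l : List Int, (runScan l).2.length ≤ l.length := by
  intro l
  induction l with
  | nil => simp [runScan]
  | cons x xs ih =>
    simp only [runScan]
    split <;> simp <;> omega

-- outer while loop of Source B over the remaining suffix
def bGo : List Int → List (List Int)
  | [] => []
  | x :: xs =>
    if has1 x then
      match h : runScan xs with
      | (_, []) => []                         -- trailing run: j = n, not emitted
      | (r, y :: ys) => (x :: r) :: bGo (y :: ys)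
    else [x] :: bGo xs
termination_by l => l.length
decreasing_by
  · have hle := runScan_length xs
    rw [h] at hle
    simp at hle ⊢
    omega
  · simp

def stack_sep_alt (lista : List Int) : List (List Int) := bGo lista

-- ===== PRECONDITION & SPEC =====
def Spec_stack_sep (lista : List Int) (out : List (List Int)) : Prop := out = stack_sep_alt lista
instance (lista : List Int) (out : List (List Int)) : Decidable (Spec_stack_sep lista out) := by unfold Spec_stack_sep; infer_instance

-- ===== CLAIM (what is proved, stated in full; the proofs are below) =====
def Claim_equal_stack_sep : Prop := ∀ (lista : List Int), Dom_stack_sep lista → Spec_stack_sep lista (stack_sep lista)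

-- ===== LEMMAS AND PROOFS =====

theorem runScan_all (l : List Int) (h : ∀ a ∈ l, has1 a = true) : runScan l = (l, []) := by
  induction l with
  | nil => rfl
  | cons x xs ih =>
    have hx : has1 x = true := h x (by simp)
    simp [runScan, hx, ih (fun a ha => h a (by simp [ha]))]

theorem runScan_prefix (s : List Int) (x : Int) (t : List Int)
    (hs : ∀ a ∈ s, has1 a = true) (hx : has1 x = false) :
    runScan (s ++ x :: t) = (s, x :: t) := by
  induction s with
  | nil => simp [runScan, hx]
  | cons a s' ih =>
    have ha : has1 a = true := hs a (by simp)
    simp [runScan, ha, ih (fun b hb => hs b (by simp [hb]))]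

theorem bGo_all (s : List Int) (h : ∀ a ∈ s, has1 a = true) : bGo s = [] := by
  cases s with
  | nil => simp [bGo]
  | cons x xs =>
    have hx : has1 x = true := h x (by simp)
    rw [bGo]
    simp only [hx, if_true]
    rw [runScan_all xs (fun a ha => h a (by simp [ha]))]

theorem bGo_cons_false (x : Int) (xs : List Int) (hx : has1 x = false) :
    bGo (x :: xs) = [x] :: bGo xs := by
  rw [bGo]; simp [hx]

theorem foldA (l : List Int) : ∀ (b : List (List Int)) (s : List Int),
    (∀ a ∈ s, has1 a = true) →
    (l.foldl
      (fun (st : List (List Int) × List Int) i =>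
        if has1 i then (st.1, st.2 ++ [i])
        else ((if st.2 ≠ [] then st.1 ++ [st.2] else st.1) ++ [[i]], []))
      (b, s)).1 = b ++ bGo (s ++ l) := by
  induction l with
  | nil =>
    intro b s hs
    simp [bGo_all s hs]
  | cons x xs ih =>
    intro b s hs
    by_cases hx : has1 x = true
    · have hall : ∀ a ∈ s ++ [x], has1 a = true := by
        intro a ha
        rcases List.mem_append.mp ha with h' | h'
        · exact hs a h'
        · simp at h'; subst h'; exact hx
      simp only [List.foldl_cons, hx, if_true]
      rw [ih b (s ++ [x]) hall, List.append_assoc]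
      rfl
    · have hx' : has1 x = false := by simpa using hx
      have hb : bGo (s ++ x :: xs) = (if s ≠ [] then [s] else []) ++ [x] :: bGo xs := by
        cases s with
        | nil => simp [bGo, hx']
        | cons a s' =>
          have ha : has1 a = true := hs a (by simp)
          have hco : (a :: s') ++ x :: xs = a :: (s' ++ x :: xs) := by simp
          rw [hco, bGo]
          simp only [ha, if_true]
          rw [runScan_prefix s' x xs (fun b hb => hs b (by simp [hb])) hx']
          show (a :: s') :: bGo (x :: xs) = (if a :: s' ≠ [] then [a :: s'] else []) ++ [x] :: bGo xs
          rw [bGo_cons_false x xs hx']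
          simp
      simp only [List.foldl_cons, hx', Bool.false_eq_true, if_false]
      rw [ih ((if s ≠ [] then b ++ [s] else b) ++ [[x]]) [] (by simp), hb]
      by_cases hsnil : s = [] <;> simp [hsnil]

-- ===== VERDICT (by name: the statement is the Claim_ definition above) =====
theorem stack_sep_spec : Claim_equal_stack_sep := by
  intro lista _
  unfold Spec_stack_sep stack_sep stack_sep_alt
  rw [foldA lista [] [] (by simp)]
  simp
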